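-- pv_equiv track=rewrite | github.com/ElAwbery/Python-Practice | Exhaustive enumeration practice/dominoes.py | domino_pairs
-- ===== SOURCE A (Python) =====
-- def domino_pairs(n):
--     """
--     n is an integer, the max number of dots per side of a domino pair
--     returns a list of all pairs in the set and the number of dominos in a set
--     """
--     domino_list = []
--     number_in_set = 0
--     for side1 in range(n+1):         #n+1 because blanks are included
--         for side2 in range(n+1):
--             pair = (side1, side2)
--             duplicate = (side2, side1)
--             if duplicate not in domino_list:
--                 domino_list.append(pair)
--                 number_in_set += 1
--     domino_set = (number_in_set, domino_list)
--     return domino_set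
-- ===== SOURCE B (Python) =====
-- def domino_pairs(n):
--     """
--     n is an integer, the max number of dots per side of a domino pair
--     returns a list of all pairs in the set and the number of dominos in a set
--     """
--     pairs = [(a, b) for a in range(n + 1) for b in range(n + 1) if a <= b]
--     return (len(pairs), pairs)
-- ===== Notes on version B (the rewrite author's own statement) =====
-- stated objective: faster
-- what changed: B builds the list in one comprehension over the square grid filtered by a <= b (no growing-list membership scan, no running counter), and the count is just the list length.
import Mathlib
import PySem

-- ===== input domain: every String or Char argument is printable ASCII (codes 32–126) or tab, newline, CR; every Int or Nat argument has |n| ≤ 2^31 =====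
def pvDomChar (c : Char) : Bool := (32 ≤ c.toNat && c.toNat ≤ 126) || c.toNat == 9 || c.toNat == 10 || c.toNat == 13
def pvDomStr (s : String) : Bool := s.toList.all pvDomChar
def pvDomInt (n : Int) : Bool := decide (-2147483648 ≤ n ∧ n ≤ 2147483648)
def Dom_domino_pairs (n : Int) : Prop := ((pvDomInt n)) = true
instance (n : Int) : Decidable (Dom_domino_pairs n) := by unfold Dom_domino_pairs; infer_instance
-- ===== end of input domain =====

-- B builds the list in one filtered comprehension over the square grid (a <= b) instead of A's growing-list membership scan with a running counter; objective faster.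

-- ===== PORT A =====
def domino_pairs (n : Int) : Int × (List (Int × Int)) :=
  let st :=
    (PySem.List.pyRange 0 (n+1) 1).foldl (fun st side1 =>
      (PySem.List.pyRange 0 (n+1) 1).foldl
        (fun (st : List (Int × Int) × Int) side2 =>
          if (side2, side1) ∈ st.1 then st
          else (st.1 ++ [(side1, side2)], st.2 + 1))
        st)
      ([], 0)
  (st.2, st.1)

-- ===== PORT B =====
-- [(a, b) for a in range(n+1) for b in range(n+1) if a <= b]; count = len(pairs)
def domino_pairs_alt (n : Int) : Int × (List (Int × Int)) :=
  let pairs :=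
    (PySem.List.pyRange 0 (n+1) 1).flatMap (fun a =>
      (PySem.List.pyRange 0 (n+1) 1).filterMap
        (fun b => if a ≤ b then some (a, b) else none))
  ((pairs.length : Int), pairs)

-- ===== PRECONDITION & SPEC =====
def Spec_domino_pairs (n : Int) (out : Int × (List (Int × Int))) : Prop := out = domino_pairs_alt n
instance (n : Int) (out : Int × (List (Int × Int))) : Decidable (Spec_domino_pairs n out) := by unfold Spec_domino_pairs; infer_instance

-- ===== CLAIM =====
def Claim_equal_domino_pairs : Prop := ∀ (n : Int), Dom_domino_pairs n → Spec_domino_pairs n (domino_pairs n)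

-- ===== LEMMAS AND PROOFS =====

-- the list of all rows for side1 ∈ xs: row s1 = [(s1, j) for j in range(s1, n+1)]
def pvRows (n : Int) (xs : List Int) : List (Int × Int) :=
  xs.flatMap (fun s1 => (PySem.List.pyRange s1 (n+1) 1).map (fun j => (s1, j)))

theorem mem_pvRows (n t : Int) (p : Int × Int) :
    p ∈ pvRows n (PySem.List.pyRange 0 t 1) ↔ 0 ≤ p.1 ∧ p.1 < t ∧ p.1 ≤ p.2 ∧ p.2 < n + 1 := by
  simp only [pvRows, List.mem_flatMap, List.mem_map, PySem.List.mem_pyRange_one]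
  constructor
  · rintro ⟨s1, hs1, j, hj, rfl⟩; omega
  · rintro ⟨h1, h2, h3, h4⟩; exact ⟨p.1, by omega, p.2, by omega, rfl⟩

-- A's inner step
def pvAstep (s1 : Int) (st : List (Int × Int) × Int) (s2 : Int) : List (Int × Int) × Int :=
  if (s2, s1) ∈ st.1 then st else (st.1 ++ [(s1, s2)], st.2 + 1)

theorem innerA_skip (s1 : Int) (xs : List Int) (L : List (Int × Int)) (c : Int)
    (hL : ∀ x ∈ xs, (x, s1) ∈ L) :
    xs.foldl (pvAstep s1) (L, c) = (L, c) := by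
  induction xs with
  | nil => rfl
  | cons x xs ih =>
      simp only [List.foldl_cons, pvAstep, hL x (List.mem_cons_self ..), if_pos]
      exact ih fun y hy => hL y (List.mem_cons_of_mem _ hy)

theorem innerA_go (s1 : Int) (xs : List Int) (L : List (Int × Int)) (c : Int)
    (hnd : xs.Nodup) (hL : ∀ x ∈ xs, (x, s1) ∉ L) :
    xs.foldl (pvAstep s1) (L, c) = (L ++ xs.map (fun j => (s1, j)), c + (xs.length : Int)) := by
  induction xs generalizing L c with
  | nil => simp
  | cons x xs ih =>
      simp only [List.foldl_cons, pvAstep, hL x (List.mem_cons_self ..), if_neg, not_false_iff]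
      rw [ih (L ++ [(s1, x)]) (c + 1) hnd.of_cons]
      · simp [List.append_assoc]; omega
      · intro y hy
        simp only [List.mem_append, List.mem_singleton, not_or]
        refine ⟨hL y (List.mem_cons_of_mem _ hy), ?_⟩
        intro h
        have hy1 : y = s1 := (Prod.mk.injEq ..).mp h |>.1
        have hx1 : s1 = x := ((Prod.mk.injEq ..).mp h).2
        have : x ∈ xs := by rw [← hx1, ← hy1]; exact hy
        exact (List.nodup_cons.mp hnd).1 this

theorem outerA (n t : Int) (ht : 0 ≤ t) (htn : t ≤ n + 1) :
    (PySem.List.pyRange t (n+1) 1).foldl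
      (fun st side1 => (PySem.List.pyRange 0 (n+1) 1).foldl (pvAstep side1) st)
      (pvRows n (PySem.List.pyRange 0 t 1), ((pvRows n (PySem.List.pyRange 0 t 1)).length : Int))
    = (pvRows n (PySem.List.pyRange 0 (n+1) 1),
       ((pvRows n (PySem.List.pyRange 0 (n+1) 1)).length : Int)) := by
  by_cases h : t = n + 1
  · subst h; rw [PySem.List.pyRange_one_eq_nil (le_refl _)]; rfl
  · have hlt : t < n + 1 := lt_of_le_of_ne htn h
    rw [PySem.List.pyRange_one_cons hlt, List.foldl_cons]
    have hsplit : PySem.List.pyRange 0 (n+1) 1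
        = PySem.List.pyRange 0 t 1 ++ PySem.List.pyRange t (n+1) 1 :=
      PySem.List.pyRange_one_append 0 t (n+1) ht htn
    set L := pvRows n (PySem.List.pyRange 0 t 1) with hLdef
    have hstep : (PySem.List.pyRange 0 (n+1) 1).foldl (pvAstep t) (L, (L.length : Int))
        = (pvRows n (PySem.List.pyRange 0 (t+1) 1),
           ((pvRows n (PySem.List.pyRange 0 (t+1) 1)).length : Int)) := by
      rw [hsplit, List.foldl_append]
      rw [innerA_skip t _ L _ (fun x hx => by
        rw [hLdef, mem_pvRows]
        have := (PySem.List.mem_pyRange_one).mp hx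
        omega)]
      rw [innerA_go t (PySem.List.pyRange t (n+1) 1) L _ (PySem.List.nodup_pyRange_one _ _) (fun x hx hmem => by
        rw [hLdef, mem_pvRows] at hmem
        have := (PySem.List.mem_pyRange_one).mp hx
        omega)]
      have hrows : pvRows n (PySem.List.pyRange 0 (t+1) 1)
          = L ++ (PySem.List.pyRange t (n+1) 1).map (fun j => (t, j)) := by
        rw [hLdef, pvRows, pvRows, PySem.List.pyRange_one_succ_right ht, List.flatMap_append]
        simp
      rw [hrows]; simp
    rw [hstep]
    exact outerA n (t+1) (by omega) (by omega)
termination_by (n + 1 - t).toNat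
decreasing_by omega

-- B's filtered row equals the triangular row
theorem filterMap_row (n a : Int) (ha : 0 ≤ a) :
    (PySem.List.pyRange 0 (n+1) 1).filterMap (fun b => if a ≤ b then some (a, b) else none)
      = (PySem.List.pyRange a (n+1) 1).map (fun j => (a, j)) := by
  by_cases han : a ≤ n + 1
  · rw [PySem.List.pyRange_one_append 0 a (n+1) ha han, List.filterMap_append]
    have h1 : (PySem.List.pyRange 0 a 1).filterMap
        (fun b => if a ≤ b then some (a, b) else none) = [] := by
      rw [List.filterMap_eq_nil_iff]
      intro b hb
      have := (PySem.List.mem_pyRange_one).mp hb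
      rw [if_neg (by omega)]
    have h2 : (PySem.List.pyRange a (n+1) 1).filterMap
        (fun b => if a ≤ b then some (a, b) else none)
        = (PySem.List.pyRange a (n+1) 1).map (fun j => (a, j)) := by
      rw [List.filterMap_eq_map_iff_forall_eq_some.mpr]
      intro b hb
      have := (PySem.List.mem_pyRange_one).mp hb
      simp only [if_pos (by omega : a ≤ b)]
    rw [h1, h2, List.nil_append]
  · rw [PySem.List.pyRange_one_eq_nil (by omega : n + 1 ≤ a), List.map_nil,
        List.filterMap_eq_nil_iff]
    intro b hb
    have := (PySem.List.mem_pyRange_one).mp hb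
    rw [if_neg (by omega)]

theorem flatMap_congr_mem {α β : Type} (l : List α) (f g : α → List β)
    (h : ∀ x ∈ l, f x = g x) : l.flatMap f = l.flatMap g := by
  induction l with
  | nil => rfl
  | cons x xs ih =>
      simp only [List.flatMap_cons, h x (List.mem_cons_self ..),
        ih fun y hy => h y (List.mem_cons_of_mem _ hy)]

theorem B_pairs_eq (n : Int) :
    (PySem.List.pyRange 0 (n+1) 1).flatMap (fun a =>
      (PySem.List.pyRange 0 (n+1) 1).filterMap
        (fun b => if a ≤ b then some (a, b) else none))
    = pvRows n (PySem.List.pyRange 0 (n+1) 1) := by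
  unfold pvRows
  exact flatMap_congr_mem _ _ _ fun a ha =>
    filterMap_row n a ((PySem.List.mem_pyRange_one).mp ha).1

-- ===== VERDICT =====
theorem domino_pairs_spec : Claim_equal_domino_pairs := by
  intro n _
  unfold Spec_domino_pairs domino_pairs domino_pairs_alt
  by_cases hn : n + 1 ≤ 0
  · rw [PySem.List.pyRange_one_eq_nil (by omega)]; rfl
  · have ha := outerA n 0 le_rfl (by omega)
    have h0 : pvRows n (PySem.List.pyRange 0 0 1) = [] := by
      rw [PySem.List.pyRange_one_eq_nil le_rfl]; rfl
    rw [h0] at ha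
    simp only [List.length_nil, Int.natCast_zero] at ha
    rw [show ((fun st side1 => (PySem.List.pyRange 0 (n+1) 1).foldl
        (fun (st : List (Int × Int) × Int) side2 =>
          if (side2, side1) ∈ st.1 then st
          else (st.1 ++ [(side1, side2)], st.2 + 1)) st)
        : List (Int × Int) × Int → Int → List (Int × Int) × Int)
      = (fun st side1 => (PySem.List.pyRange 0 (n+1) 1).foldl (pvAstep side1) st) from rfl]
    rw [ha, B_pairs_eq]
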